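-- pv_equiv track=rewrite | github.com/usa8bit/Sr_SE_USAMAH_Technical_Assessment_250514 | Sr_SE_USAMAH_Technical_Assessment_250414.py | kemahiran_maksimal
-- ===== SOURCE A (Python) =====
-- def kemahiran_maksimal(N, M, A, B):
--     lawan = list(zip(A, B))
--     while True:
--         kandidat_lawan = [x for x in lawan if x[0] <= M]
--         if not kandidat_lawan:
--             break
--         lawan_terbaik = max(kandidat_lawan, key = lambda x: x[1])
--         M += lawan_terbaik[1]
--         lawan.remove(lawan_terbaik)
--     return M
-- ===== SOURCE B (Python) =====
-- def kemahiran_maksimal(N, M, A, B):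
--     # Sort once by (gain descending, original index); then each round beat the
--     # first still-pending reachable opponent, splicing it out at its position.
--     pending = sorted(((a, b, i) for i, (a, b) in enumerate(zip(A, B))),
--                      key=lambda t: (-t[1], t[2]))
--     while True:
--         hit = _beat_first_reachable(pending, M)
--         if hit is None:
--             return M
--         gain, pending = hit
--         M += gain
--
-- def _beat_first_reachable(pending, M):
--     for j, (req, gain, _) in enumerate(pending):
--         if req <= M:
--             return gain, pending[:j] + pending[j+1:]
--     return None
-- ===== Notes on version B (the rewrite author's own statement) =====
-- stated objective: faster
-- what changed: A repeatedly filters the whole remaining list, takes the max-gain reachable opponent and removes it by value (three full scans per round); B sorts the opponents once by (gain descending, original index) and then each round splices out the first still-pending reachable opponent in a single prefix scan of the sorted list.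
import Mathlib
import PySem

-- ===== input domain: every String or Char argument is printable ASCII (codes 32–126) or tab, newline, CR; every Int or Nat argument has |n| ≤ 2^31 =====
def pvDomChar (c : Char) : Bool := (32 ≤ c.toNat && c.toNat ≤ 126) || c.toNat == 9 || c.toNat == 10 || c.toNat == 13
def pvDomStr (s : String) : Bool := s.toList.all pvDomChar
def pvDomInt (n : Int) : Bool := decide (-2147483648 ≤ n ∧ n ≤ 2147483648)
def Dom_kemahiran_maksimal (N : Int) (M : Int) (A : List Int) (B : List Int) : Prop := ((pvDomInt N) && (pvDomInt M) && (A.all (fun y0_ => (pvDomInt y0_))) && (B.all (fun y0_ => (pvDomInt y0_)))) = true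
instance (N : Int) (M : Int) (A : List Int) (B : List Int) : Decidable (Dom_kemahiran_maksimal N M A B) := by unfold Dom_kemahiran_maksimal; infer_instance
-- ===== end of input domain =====

-- B replaces A's per-round filter+max+remove-by-value selection (three full
-- scans per round) by one sort (gain descending, original index) followed,
-- each round, by a single prefix scan that splices out the first still-pending
-- reachable opponent (objective: faster; a timing run measured it so).

-- membership from a successful Python list.remove (used for termination of port A)
lemma km_remove?_mem {α : Type} [BEq α] [LawfulBEq α] : ∀ {xs ys : List α} {v : α},
    PySem.List.remove? xs v = some ys → v ∈ xs := by
  intro xs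
  induction xs with
  | nil => intro ys v h; simp [PySem.List.remove?] at h
  | cons x xs ih =>
    intro ys v h
    by_cases hxv : x = v
    · subst hxv; exact List.mem_cons_self ..
    · rw [PySem.List.remove?_cons_of_ne xs hxv] at h
      cases hr : PySem.List.remove? xs v with
      | none => rw [hr] at h; simp at h
      | some zs => exact List.mem_cons_of_mem _ (ih hr)

-- ===== PORT A =====
-- the while-loop of A: filter the reachable opponents, beat the max-gain one, remove it
def kmLoopA (lawan : List (Int × Int)) (M : Int) : Int :=
  if lawan.filter (fun x => decide (x.1 ≤ M)) = [] then M
  else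
    match PySem.List.max? (lawan.filter (fun x => decide (x.1 ≤ M))) (fun x => x.2) with
    | none => M          -- unreachable: the candidate list is nonempty
    | some best =>
      match hr : PySem.List.remove? lawan best with
      | none => M + best.2   -- unreachable: best is a member of lawan
      | some lawan' => kmLoopA lawan' (M + best.2)
termination_by lawan.length
decreasing_by
  have hmem : best ∈ lawan := km_remove?_mem hr
  rw [PySem.List.remove?_eq_some_erase _ best hmem] at hr
  injection hr with hr
  subst hr
  have h1 := List.length_erase_of_mem hmem
  have h2 := List.length_pos_of_mem hmem
  omega

def kemahiran_maksimal (N : Int) (M : Int) (A : List Int) (B : List Int) : Int :=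
  kmLoopA (A.zip B) M

-- ===== PORT B =====
-- _beat_first_reachable: scan the pending list; at the first reachable opponent
-- return its gain together with the list with that position spliced out
def kmPick (M : Int) : List (Int × Int × Int) → Option (Int × List (Int × Int × Int))
  | [] => none
  | t :: rest =>
    if t.1 ≤ M then some (t.2.1, rest)
    else
      match kmPick M rest with
      | none => none
      | some (g, rest') => some (g, t :: rest')

lemma kmPick_length {M : Int} : ∀ {S S' : List (Int × Int × Int)} {g : Int},
    kmPick M S = some (g, S') → S'.length + 1 = S.length := by
  intro S
  induction S with
  | nil => intro S' g h; simp [kmPick] at h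
  | cons t rest ih =>
    intro S' g h
    rw [kmPick] at h
    by_cases ht : t.1 ≤ M
    · rw [if_pos ht] at h
      injection h with h
      obtain ⟨rfl, rfl⟩ := Prod.mk.inj h
      simp
    · rw [if_neg ht] at h
      cases hr : kmPick M rest with
      | none => rw [hr] at h; simp at h
      | some p =>
        rw [hr] at h
        injection h with h
        obtain ⟨rfl, rfl⟩ := Prod.mk.inj h
        have := ih (g := p.1) (S' := p.2) (by rw [hr])
        simp [← this]

-- the while-loop of B: beat and splice out the first pending reachable opponent
def kmLoopB (pending : List (Int × Int × Int)) (M : Int) : Int :=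
  match h : kmPick M pending with
  | none => M
  | some (g, pending') => kmLoopB pending' (M + g)
termination_by pending.length
decreasing_by
  have := kmPick_length h
  omega

def kemahiran_maksimal_alt (N : Int) (M : Int) (A : List Int) (B : List Int) : Int :=
  kmLoopB
    (PySem.List.sorted
      ((PySem.List.enumerate (A.zip B)).map (fun p => (p.2.1, p.2.2, p.1)))
      (fun t => toLex (-t.2.1, t.2.2)))
    M

-- ===== PRECONDITION & SPEC =====
def Spec_kemahiran_maksimal (N : Int) (M : Int) (A : List Int) (B : List Int) (out : Int) : Prop := out = kemahiran_maksimal_alt N M A B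
instance (N : Int) (M : Int) (A : List Int) (B : List Int) (out : Int) : Decidable (Spec_kemahiran_maksimal N M A B out) := by unfold Spec_kemahiran_maksimal; infer_instance

-- ===== CLAIM (what is proved, stated in full; the proofs are below) =====
def Claim_equal_kemahiran_maksimal : Prop := ∀ (N : Int) (M : Int) (A : List Int) (B : List Int), Dom_kemahiran_maksimal N M A B → Spec_kemahiran_maksimal N M A B (kemahiran_maksimal N M A B)

-- ===== LEMMAS AND PROOFS =====

-- B's splice-out pick, on a duplicate-free list, is exactly "find first
-- reachable, return its gain and the list with its first occurrence erased"
lemma kmPick_eq_find {M : Int} : ∀ {S : List (Int × Int × Int)}, S.Nodup →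
    kmPick M S = (S.find? (fun t => decide (t.1 ≤ M))).map (fun t => (t.2.1, S.erase t)) := by
  intro S
  induction S with
  | nil => intro _; rfl
  | cons x xs ih =>
    intro hnd
    by_cases hx : x.1 ≤ M
    · rw [kmPick, if_pos hx, List.find?_cons_of_pos (by simpa using hx)]
      simp
    · rw [kmPick, if_neg hx, List.find?_cons_of_neg (by simpa using hx),
        ih (List.nodup_cons.mp hnd).2]
      cases hf : xs.find? (fun t => decide (t.1 ≤ M)) with
      | none => simp
      | some t =>
        have htxs : t ∈ xs := List.mem_of_find?_eq_some hf
        have hxt : x ≠ t := fun h => (List.nodup_cons.mp hnd).1 (h ▸ htxs)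
        simp [List.erase_cons, hxt]

-- the value (requirement, gain) carried by an indexed opponent
def kmStrip (t : Int × Int × Int) : Int × Int := (t.1, t.2.1)
-- B's sort key: (gain descending, original index ascending), lexicographically
def kmKey (t : Int × Int × Int) : Lex (Int × Int) := toLex (-t.2.1, t.2.2)

lemma kmKey_lt_iff (s t : Int × Int × Int) :
    kmKey s < kmKey t ↔ (t.2.1 < s.2.1 ∨ (s.2.1 = t.2.1 ∧ s.2.2 < t.2.2)) := by
  rw [kmKey, kmKey, Prod.Lex.toLex_lt_toLex]
  constructor
  · rintro (h | ⟨h1, h2⟩)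
    · left; omega
    · right; constructor; omega; exact h2
  · rintro (h | ⟨h1, h2⟩)
    · left; omega
    · right; constructor; omega; exact h2

-- in a strictly key-sorted list, find? returns the unique key-minimal satisfying element
lemma km_find_min {S : List (Int × Int × Int)} {q : (Int × Int × Int) → Bool} {pick : Int × Int × Int}
    (hs : S.Pairwise (fun s t => kmKey s < kmKey t))
    (h : S.find? q = some pick) :
    pick ∈ S ∧ q pick = true ∧ ∀ t ∈ S, q t = true → t = pick ∨ kmKey pick < kmKey t := by
  induction S with
  | nil => simp at h
  | cons x xs ih =>
    rw [List.pairwise_cons] at hs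
    cases hqx : q x with
    | true =>
      rw [List.find?_cons_of_pos hqx] at h
      injection h with h; subst h
      refine ⟨List.mem_cons_self .., hqx, ?_⟩
      intro t ht _
      rcases List.mem_cons.mp ht with rfl | ht'
      · exact Or.inl rfl
      · exact Or.inr (hs.1 t ht')
    | false =>
      rw [List.find?_cons_of_neg (by simp [hqx])] at h
      obtain ⟨hm, hq, hmin⟩ := ih hs.2 h
      refine ⟨List.mem_cons_of_mem _ hm, hq, ?_⟩
      intro t ht hqt
      rcases List.mem_cons.mp ht with rfl | ht'
      · rw [hqx] at hqt; exact absurd hqt (by simp)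
      · exact hmin t ht' hqt

-- one step of Python max's running-maximum fold
lemma km_max_step {α : Type} (key : α → Int) (a x : α) (xs : List α) :
    PySem.List.max? (a :: x :: xs) key = PySem.List.max? ((if key a < key x then x else a) :: xs) key := by
  by_cases hc : key a < key x <;> simp [PySem.List.max?, List.foldl_cons, hc]

-- Python max returns the FIRST maximal element: everything strictly before it has a smaller key
lemma km_max_go {α : Type} (key : α → Int) :
    ∀ (xs : List α) (a m : α),
      PySem.List.max? (a :: xs) key = some m →
      (m = a ∧ ∀ y ∈ xs, key y ≤ key a) ∨
      (∃ l1 l2, xs = l1 ++ m :: l2 ∧ key a < key m ∧ ∀ y ∈ l1, key y < key m) := by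
  intro xs
  induction xs with
  | nil =>
    intro a m h
    simp [PySem.List.max?] at h
    exact Or.inl ⟨h.symm, by simp⟩
  | cons x xs ih =>
    intro a m h
    rw [km_max_step] at h
    by_cases hc : key a < key x
    · rw [if_pos hc] at h
      rcases ih x m h with ⟨rfl, hall⟩ | ⟨l1, l2, hs, hlt, hpre⟩
      · exact Or.inr ⟨[], xs, rfl, hc, by simp⟩
      · refine Or.inr ⟨x :: l1, l2, by rw [hs]; rfl, lt_trans hc hlt, ?_⟩
        intro y hy
        rcases List.mem_cons.mp hy with rfl | hy'
        · exact hlt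
        · exact hpre y hy'
    · rw [if_neg hc] at h
      rcases ih a m h with ⟨rfl, hall⟩ | ⟨l1, l2, hs, hlt, hpre⟩
      · refine Or.inl ⟨rfl, ?_⟩
        intro y hy
        rcases List.mem_cons.mp hy with rfl | hy'
        · exact le_of_not_gt hc
        · exact hall y hy'
      · refine Or.inr ⟨x :: l1, l2, by rw [hs]; rfl, hlt, ?_⟩
        intro y hy
        rcases List.mem_cons.mp hy with rfl | hy'
        · exact lt_of_le_of_lt (le_of_not_gt hc) hlt
        · exact hpre y hy'

-- Python max over the stripped list, pulled back to the indexed list: the chosen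
-- element is the unique kmKey-minimum of the candidate list
lemma km_max_strip {F : List (Int × Int × Int)} {best : Int × Int}
    (hpw : F.Pairwise (fun s t => s.2.2 < t.2.2))
    (hm : PySem.List.max? (F.map kmStrip) (fun x => x.2) = some best) :
    ∃ tb, tb ∈ F ∧ kmStrip tb = best ∧ ∀ t ∈ F, t = tb ∨ kmKey tb < kmKey t := by
  have hmax := PySem.List.max?_isMax hm
  obtain ⟨k1, k2, hsplit, hpre⟩ :
      ∃ k1 k2, F.map kmStrip = k1 ++ best :: k2 ∧ ∀ y ∈ k1, y.2 < best.2 := by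
    cases hFm : F.map kmStrip with
    | nil => rw [hFm] at hm; simp [PySem.List.max?] at hm
    | cons x rest =>
      rw [hFm] at hm
      rcases km_max_go (fun y : Int × Int => y.2) rest x best hm with ⟨rfl, _⟩ | ⟨l1, l2, hs, hlt, hpre⟩
      · exact ⟨[], rest, rfl, by simp⟩
      · refine ⟨x :: l1, l2, by rw [hs]; rfl, ?_⟩
        intro y hy
        rcases List.mem_cons.mp hy with rfl | hy'
        · exact hlt
        · exact hpre y hy'
  obtain ⟨K1, KR, hFsplit, hK1, hKR⟩ := List.map_eq_append_iff.mp hsplit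
  obtain ⟨tb, K2, hKRs, htbs, hK2⟩ := List.map_eq_cons_iff.mp hKR
  subst hKRs
  have hb2 : best.2 = tb.2.1 := by rw [← htbs]; rfl
  refine ⟨tb, ?_, htbs, ?_⟩
  · rw [hFsplit]; exact List.mem_append_right _ (List.mem_cons_self ..)
  · intro t ht
    rw [hFsplit] at ht
    rw [hFsplit, List.pairwise_append] at hpw
    rcases List.mem_append.mp ht with h1 | h2
    · right
      have hmem : kmStrip t ∈ k1 := hK1 ▸ List.mem_map_of_mem h1
      have hlt : (kmStrip t).2 < best.2 := hpre _ hmem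
      rw [kmKey_lt_iff]
      left
      have : t.2.1 < tb.2.1 := by
        have h' : t.2.1 < best.2 := hlt
        omega
      exact this
    · rcases List.mem_cons.mp h2 with rfl | h2'
      · exact Or.inl rfl
      · right
        have hmemF : t ∈ F := by rw [hFsplit]; exact List.mem_append_right _ (List.mem_cons_of_mem _ h2')
        have hle : t.2.1 ≤ best.2 := by
          have := hmax (kmStrip t) (List.mem_map_of_mem hmemF)
          simpa [kmStrip] using this
        rw [kmKey_lt_iff]
        rcases lt_or_eq_of_le hle with hlt | heq
        · left; omega
        · right
          refine ⟨by omega, ?_⟩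
          have := (List.pairwise_cons.mp hpw.2.1).1 t h2'
          exact this

-- the simulation: A's loop on the value list equals B's loop on any strictly
-- key-sorted rearrangement of the index-decorated list
lemma km_loop_eq : ∀ (n : Nat) (L : List (Int × Int)) (LI S : List (Int × Int × Int)) (M : Int),
    L.length = n →
    L = LI.map kmStrip →
    LI.Pairwise (fun s t => s.2.2 < t.2.2) →
    S.Perm LI →
    S.Pairwise (fun s t => kmKey s < kmKey t) →
    kmLoopA L M = kmLoopB S M := by
  intro n
  induction n using Nat.strong_induction_on with
  | _ n IH =>
  intro L LI S M hlen hmap hidx hperm hsort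
  have hnd : S.Nodup := hsort.imp (fun h heq => absurd (heq ▸ h) (lt_irrefl _))
  by_cases hk : L.filter (fun x => decide (x.1 ≤ M)) = []
  · have hfind : S.find? (fun t => decide (t.1 ≤ M)) = none := by
      rw [List.find?_eq_none]
      intro t ht
      simp only [decide_eq_true_eq]
      intro hle
      have htLI : t ∈ LI := hperm.mem_iff.mp ht
      have hmem : kmStrip t ∈ L.filter (fun x => decide (x.1 ≤ M)) := by
        rw [List.mem_filter]
        exact ⟨by rw [hmap]; exact List.mem_map_of_mem htLI, by simpa [kmStrip] using hle⟩
      rw [hk] at hmem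
      simp at hmem
    rw [kmLoopA.eq_def, kmLoopB.eq_def, if_pos hk]
    split
    · rfl
    · rename_i g pending' heq
      rw [kmPick_eq_find hnd, hfind] at heq
      simp at heq
  · obtain ⟨best, hmax⟩ :
        ∃ best, PySem.List.max? (L.filter (fun x => decide (x.1 ≤ M))) (fun x => x.2) = some best := by
      cases hmx : PySem.List.max? (L.filter (fun x => decide (x.1 ≤ M))) (fun x => x.2) with
      | none => exact absurd (Iff.mp (PySem.List.max?_eq_none_iff _ _) hmx) hk
      | some b => exact ⟨b, rfl⟩
    have hkan : L.filter (fun x => decide (x.1 ≤ M))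
        = (LI.filter (fun t => decide (t.1 ≤ M))).map kmStrip := by
      rw [hmap, List.filter_map]; rfl
    have hFpw : (LI.filter (fun t => decide (t.1 ≤ M))).Pairwise (fun s t => s.2.2 < t.2.2) :=
      hidx.filter _
    obtain ⟨tb, htbF, hstrip, hmin⟩ := km_max_strip hFpw (hkan ▸ hmax)
    have htbLI : tb ∈ LI := (List.mem_filter.mp htbF).1
    have htbq : (decide (tb.1 ≤ M)) = true := (List.mem_filter.mp htbF).2
    have htbS : tb ∈ S := hperm.mem_iff.mpr htbLI
    have hfind : S.find? (fun t => decide (t.1 ≤ M)) = some tb := by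
      cases hf : S.find? (fun t => decide (t.1 ≤ M)) with
      | none => exact absurd htbq (List.find?_eq_none.mp hf tb htbS)
      | some pick =>
        obtain ⟨hpS, hpq, hpmin⟩ := km_find_min hsort hf
        have hpF : pick ∈ LI.filter (fun t => decide (t.1 ≤ M)) :=
          List.mem_filter.mpr ⟨hperm.mem_iff.mp hpS, hpq⟩
        rcases hmin pick hpF with h1 | h1
        · rw [h1]
        · rcases hpmin tb htbS htbq with h2 | h2
          · rw [h2]
          · exact absurd h1 (lt_asymm h2)
    obtain ⟨LI1, LI2, hLIsplit⟩ := List.append_of_mem htbLI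
    have hidx12 : ∀ u ∈ LI1, u.2.2 < tb.2.2 := by
      have hpa := hidx
      rw [hLIsplit, List.pairwise_append] at hpa
      exact fun u hu => hpa.2.2 u hu tb (List.mem_cons_self ..)
    have hnotin : ∀ u ∈ LI1, kmStrip u ≠ best := by
      intro u hu heq
      have hup : (u.1, u.2.1) = (tb.1, tb.2.1) := by
        have : kmStrip u = kmStrip tb := heq.trans hstrip.symm
        simpa [kmStrip] using this
      have hu1 : u.1 = tb.1 := (Prod.mk.inj hup).1
      have hub : u.2.1 = tb.2.1 := (Prod.mk.inj hup).2
      have huF : u ∈ LI.filter (fun t => decide (t.1 ≤ M)) :=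
        List.mem_filter.mpr ⟨by rw [hLIsplit]; exact List.mem_append_left _ hu,
          by rw [hu1]; exact htbq⟩
      rcases hmin u huF with h1 | h1
      · have := hidx12 u hu; rw [h1] at this; exact lt_irrefl _ this
      · rw [kmKey_lt_iff] at h1
        have hlt := hidx12 u hu
        rcases h1 with h1 | ⟨h1a, h1b⟩ <;> omega
    have htbn1 : tb ∉ LI1 := fun h => lt_irrefl _ (hidx12 tb h)
    have hbestn : best ∉ LI1.map kmStrip := by
      intro hb
      obtain ⟨u, hu, hequ⟩ := List.mem_map.mp hb
      exact hnotin u hu hequ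
    have hLmap : L = LI1.map kmStrip ++ best :: LI2.map kmStrip := by
      rw [hmap, hLIsplit, List.map_append, List.map_cons, hstrip]
    have hLe : L.erase best = (LI1 ++ LI2).map kmStrip := by
      rw [hLmap, List.erase_append_right _ hbestn, List.erase_cons_head, List.map_append]
    have hLIe : LI.erase tb = LI1 ++ LI2 := by
      rw [hLIsplit, List.erase_append_right _ htbn1, List.erase_cons_head]
    have hbestL : best ∈ L := by
      rw [hLmap]; exact List.mem_append_right _ (List.mem_cons_self ..)
    have hb2 : best.2 = tb.2.1 := by rw [← hstrip]; rfl
    have hremA : PySem.List.remove? L best = some (L.erase best) :=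
      PySem.List.remove?_eq_some_erase _ best hbestL
    have hpickB : kmPick M S = some (tb.2.1, S.erase tb) := by
      rw [kmPick_eq_find hnd, hfind]; rfl
    rw [kmLoopA.eq_def, kmLoopB.eq_def]
    simp only [if_neg hk, hmax]
    rw [hb2]
    split
    · rename_i heq
      rw [hremA] at heq
      exact absurd heq (by simp)
    · rename_i lawan' heqA
      rw [hremA] at heqA
      injection heqA with heqA
      subst heqA
      split
      · rename_i heq
        rw [hpickB] at heq
        exact absurd heq (by simp)
      · rename_i g pending' heqB
        rw [hpickB] at heqB
        injection heqB with heqB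
        obtain ⟨rfl, rfl⟩ := Prod.mk.inj heqB
        refine IH (L.erase best).length ?_ _ (LI1 ++ LI2) (S.erase tb) _ rfl hLe ?_ ?_ ?_
        · rw [← hlen]
          have h1 := List.length_erase_of_mem hbestL
          have h2 := List.length_pos_of_mem hbestL
          omega
        · rw [← hLIe]; exact List.Pairwise.sublist (List.erase_sublist ..) hidx
        · rw [← hLIe]; exact hperm.erase tb
        · exact List.Pairwise.sublist (List.erase_sublist ..) hsort

-- ===== VERDICT (by name: the statement is the Claim_ definition above) =====
theorem kemahiran_maksimal_spec : Claim_equal_kemahiran_maksimal := by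
  intro N M A B _
  show kemahiran_maksimal N M A B = kemahiran_maksimal_alt N M A B
  rw [kemahiran_maksimal, kemahiran_maksimal_alt]
  have hidx0 : ((PySem.List.enumerate (A.zip B)).map (fun p => (p.2.1, p.2.2, p.1))).Pairwise
      (fun s t : Int × Int × Int => s.2.2 < t.2.2) := by
    rw [List.pairwise_map]
    exact PySem.List.pairwise_lt_enumerate _ _
  have hmap0 : A.zip B
      = ((PySem.List.enumerate (A.zip B)).map (fun p => (p.2.1, p.2.2, p.1))).map kmStrip := by
    rw [List.map_map]
    have : (kmStrip ∘ fun p : Int × (Int × Int) => (p.2.1, p.2.2, p.1)) = (fun p => p.2) := by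
      funext p; rfl
    rw [this, PySem.List.map_snd_enumerate]
  have hkey : (fun t : Int × Int × Int => toLex (-t.2.1, t.2.2)) = kmKey := by
    funext t; rfl
  have hperm0 := PySem.List.sorted_perm
    ((PySem.List.enumerate (A.zip B)).map (fun p => (p.2.1, p.2.2, p.1))) kmKey false
  have hle : (PySem.List.sorted ((PySem.List.enumerate (A.zip B)).map (fun p => (p.2.1, p.2.2, p.1))) kmKey).Pairwise
      (fun s t => kmKey s ≤ kmKey t) := PySem.List.sorted_pairwise _ kmKey
  have hne0 : ((PySem.List.enumerate (A.zip B)).map (fun p => (p.2.1, p.2.2, p.1))).Pairwise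
      (fun s t => kmKey s ≠ kmKey t) := by
    refine hidx0.imp ?_
    intro s t hst heq
    rw [kmKey, kmKey, toLex_inj] at heq
    have : s.2.2 = t.2.2 := (Prod.mk.inj heq).2
    omega
  have hne : (PySem.List.sorted ((PySem.List.enumerate (A.zip B)).map (fun p => (p.2.1, p.2.2, p.1))) kmKey).Pairwise
      (fun s t => kmKey s ≠ kmKey t) :=
    (List.Perm.pairwise_iff (fun h => Ne.symm h) hperm0).mpr hne0
  have hsort0 : (PySem.List.sorted ((PySem.List.enumerate (A.zip B)).map (fun p => (p.2.1, p.2.2, p.1))) kmKey).Pairwise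
      (fun s t => kmKey s < kmKey t) := by
    exact (hle.and hne).imp (fun h => lt_of_le_of_ne h.1 h.2)
  rw [hkey]
  exact km_loop_eq (A.zip B).length (A.zip B) _ _ M rfl hmap0 hidx0 hperm0 hsort0
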